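-- pv_equiv track=rewrite | github.com/latecomer04/codeforces-solutions-in-python | I_love_\%username\%.py | func
-- ===== SOURCE A (Python) =====
-- def func(n,l):
--     count = 0
--     for i in range(1, n):
--             c=l[:i]
--             a=max(c)
--             b=min(c)
--             if l[i] > a :
--                 count=count+1
--             if l[i]< b:
--                 count=count+1
--     return (count)
-- ===== SOURCE B (Python) =====
-- def func(n, l):
--     # single pass with running max/min instead of re-scanning the prefix each step
--     if n <= 1:
--         return 0
--     mx = mn = l[0]
--     count = 0
--     for x in l[1:n]:
--         if x > mx:
--             count += 1
--             mx = x
--         if x < mn: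
--             count += 1
--             mn = x
--     return count
-- ===== Notes on version B (the rewrite author's own statement) =====
-- stated objective: faster
-- what changed: B replaces A's per-step re-scan of the prefix (max/min of l[:i] recomputed for every i) with a single pass that maintains the running max and min, dropping the cost from O(n^2) to O(n).
import Mathlib
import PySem

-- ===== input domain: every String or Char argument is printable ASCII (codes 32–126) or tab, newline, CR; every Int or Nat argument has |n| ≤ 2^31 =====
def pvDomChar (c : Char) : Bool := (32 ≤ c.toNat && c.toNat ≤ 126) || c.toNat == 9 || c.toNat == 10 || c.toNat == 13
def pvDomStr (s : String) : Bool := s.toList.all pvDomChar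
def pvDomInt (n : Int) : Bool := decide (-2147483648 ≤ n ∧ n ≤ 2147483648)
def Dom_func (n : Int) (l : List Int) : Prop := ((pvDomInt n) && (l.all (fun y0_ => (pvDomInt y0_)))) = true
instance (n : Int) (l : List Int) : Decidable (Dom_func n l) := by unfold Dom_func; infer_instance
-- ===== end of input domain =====

-- B replaces A's per-step rescan of the prefix by one pass with a running max/min (O(n^2) → O(n)).

-- ===== PORT A =====
-- loop body of A: c = l[:i]; a = max(c); b = min(c); two independent ifs on l[i]
-- (max/min of an empty prefix and an out-of-range l[i] raise in Python; Pre_func excludes them,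
--  the ports use .getD 0 there)
def stepA (l : List Int) (count : Int) (i : Int) : Int :=
  let c := PySem.List.slice l none (some i)
  let a := (PySem.List.max? c (fun y => y)).getD 0
  let b := (PySem.List.min? c (fun y => y)).getD 0
  let count1 := if PySem.List.pyGetD l i 0 > a then count + 1 else count
  if PySem.List.pyGetD l i 0 < b then count1 + 1 else count1

def func (n : Int) (l : List Int) : Int :=
  (PySem.List.pyRange 1 n 1).foldl (stepA l) 0

-- ===== PORT B =====
-- loop body of B: state (mx, mn, count); the two ifs update the running extrema in place
def altStep (st : Int × Int × Int) (y : Int) : Int × Int × Int :=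
  let st1 := if y > st.1 then (y, st.2.1, st.2.2 + 1) else st
  if y < st1.2.1 then (st1.1, y, st1.2.2 + 1) else st1

def func_alt (n : Int) (l : List Int) : Int :=
  if n ≤ 1 then 0
  else
    match l with
    | [] => 0  -- B's l[0] raises here (outside Pre_func)
    | x :: _ =>
      ((PySem.List.slice l (some 1) (some n)).foldl altStep (x, x, 0)).2.2

-- ===== PRECONDITION & SPEC =====
-- A raises when 1 < n and n > len(l) (ValueError on max([]) if l is empty, else IndexError on l[i])
def Pre_func (n : Int) (l : List Int) : Prop := n ≤ 1 ∨ n ≤ (l.length : Int)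
instance (n : Int) (l : List Int) : Decidable (Pre_func n l) := by unfold Pre_func; infer_instance
def pvWitness_func : Int × List Int := (3, [1, 2, 3])

def Spec_func (n : Int) (l : List Int) (out : Int) : Prop := out = func_alt n l
instance (n : Int) (l : List Int) (out : Int) : Decidable (Spec_func n l out) := by unfold Spec_func; infer_instance

-- ===== CLAIM (what is proved, stated in full; the proofs are below) =====
def Claim_equal_func : Prop := ∀ (n : Int) (l : List Int), Dom_func n l → Pre_func n l → Spec_func n l (func n l)

-- ===== LEMMAS AND PROOFS =====

lemma altStep_eq (mx mn c y : Int) :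
    altStep (mx, mn, c) y =
      (max mx y, min mn y,
        (if y > mx then c + 1 else c) + (if y < mn then 1 else 0)) := by
  simp only [altStep]
  split_ifs with h1 h2 h3 <;> simp_all <;> omega

lemma stepA_cons_succ (x : Int) (xs : List Int) (k : Nat) (c : Int) (hk : k < xs.length) :
    stepA (x :: xs) c ((k : Int) + 1) =
      (if xs[k] > (xs.take k).foldl max x then c + 1 else c) +
      (if xs[k] < (xs.take k).foldl min x then 1 else 0) := by
  have hcast : ((k : Int) + 1) = (((k + 1 : Nat)) : Int) := by push_cast; ring
  have hget : PySem.List.pyGetD (x :: xs) ((k + 1 : Nat) : Int) 0 = xs[k] := by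
    rw [PySem.List.pyGetD_ofNat (x :: xs) (k + 1) 0 (by simp only [List.length_cons]; omega)]
    simp
  rw [hcast]
  simp only [stepA, PySem.List.slice_to_natCast, List.take_succ_cons,
    PySem.List.max?_id_cons, PySem.List.min?_id_cons, Option.getD_some, hget]
  split_ifs <;> omega

lemma main_inv (x : Int) (xs : List Int) :
    ∀ (k : Nat), k ≤ xs.length →
      (xs.take k).foldl altStep (x, x, 0) =
        ((xs.take k).foldl max x, (xs.take k).foldl min x,
          (PySem.List.pyRange 1 ((k : Int) + 1) 1).foldl (stepA (x :: xs)) 0) := by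
  intro k
  induction k with
  | zero =>
    intro _
    simp only [Nat.cast_zero, zero_add, List.take_zero, List.foldl_nil]
    rw [PySem.List.pyRange_one_eq_nil le_rfl]
    rfl
  | succ k ih =>
    intro hk
    have hk' : k < xs.length := by omega
    have htake : xs.take (k + 1) = xs.take k ++ [xs[k]] := by
      rw [List.take_add_one]
      simp [List.getElem?_eq_getElem hk']
    rw [htake, List.foldl_append, ih (by omega)]
    simp only [List.foldl_cons, List.foldl_nil]
    rw [altStep_eq]
    have h1 : ((k + 1 : Nat) : Int) + 1 = ((k : Int) + 1) + 1 := by push_cast; ring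
    rw [h1, PySem.List.pyRange_one_succ_right (a := 1) (b := (k : Int) + 1) (by omega)]
    simp only [List.foldl_append, List.foldl_cons, List.foldl_nil]
    rw [stepA_cons_succ x xs k _ hk']

theorem func_spec : Claim_equal_func := by
  unfold Claim_equal_func
  intro n l _ hpre
  unfold Spec_func
  by_cases hn : n ≤ 1
  · unfold func func_alt
    rw [PySem.List.pyRange_one_eq_nil hn, if_pos hn]
    rfl

  · have hnl : n ≤ (l.length : Int) := hpre.resolve_left hn
    obtain ⟨x, xs, rfl⟩ : ∃ x xs, l = x :: xs := by
      cases l with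
      | nil => simp at hnl; omega
      | cons a t => exact ⟨a, t, rfl⟩
    have hk : (n - 1).toNat ≤ xs.length := by
      simp only [List.length_cons] at hnl; push_cast at hnl; omega
    have hkn : (((n - 1).toNat : Nat) : Int) + 1 = n := by omega
    unfold func func_alt
    rw [if_neg hn]
    have hs : PySem.List.slice (x :: xs) (some 1) (some n) = xs.take ((n - 1).toNat) := by
      rw [PySem.List.slice_toNat (x :: xs) (by omega) (by omega)]
      norm_num
    rw [hs]
    show List.foldl (stepA (x :: xs)) 0 (PySem.List.pyRange 1 n) =
      (List.foldl altStep (x, x, 0) (List.take (n - 1).toNat xs)).2.2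
    rw [main_inv x xs ((n - 1).toNat) hk, hkn]
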